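-- pv_equiv track=rewrite | github.com/kms-sirius/ProEncryptor | decryptor.py | decreasing_alternative_horizontal_permutation_for_word
-- ===== SOURCE A (Python) =====
-- def decreasing_alternative_horizontal_permutation_for_word(word):
-- 	wordout_ls = [""] * len(word)
-- 	if len(word) % 2 == 0:
-- 		for i in range(len(word)):
-- 			if i % 2 == 0:
-- 				wordout_ls[-i-1] = word[i // 2]
-- 			else:
-- 				wordout_ls[-i-1] = word[-(i // 2) - 1]
-- 		return ''.join(wordout_ls)
-- 	else:
-- 		for i in range(len(word)):
-- 			if i % 2 == 1:
-- 				wordout_ls[-i-1] = word[i // 2]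
-- 			else:
-- 				wordout_ls[-i-1] = word[-(i // 2) - 1]
-- 		return ''.join(wordout_ls)
-- ===== SOURCE B (Python) =====
-- def decreasing_alternative_horizontal_permutation_for_word(word):
-- 	out = []
-- 	l, r = 0, len(word) - 1
-- 	take_left = len(word) % 2 == 0
-- 	while l <= r:
-- 		if take_left:
-- 			out.append(word[l])
-- 			l += 1
-- 		else:
-- 			out.append(word[r])
-- 			r -= 1
-- 		take_left = not take_left
-- 	out.reverse()
-- 	return ''.join(out)
-- ===== Notes on version B (the rewrite author's own statement) =====
-- stated objective: idiomatic
-- what changed: Replaces arithmetic computation of destination indices into a preallocated list with a two-pointer interleave (alternately consume the front and back of the word, parity choosing the start) followed by a single reverse and join.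
import Mathlib
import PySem

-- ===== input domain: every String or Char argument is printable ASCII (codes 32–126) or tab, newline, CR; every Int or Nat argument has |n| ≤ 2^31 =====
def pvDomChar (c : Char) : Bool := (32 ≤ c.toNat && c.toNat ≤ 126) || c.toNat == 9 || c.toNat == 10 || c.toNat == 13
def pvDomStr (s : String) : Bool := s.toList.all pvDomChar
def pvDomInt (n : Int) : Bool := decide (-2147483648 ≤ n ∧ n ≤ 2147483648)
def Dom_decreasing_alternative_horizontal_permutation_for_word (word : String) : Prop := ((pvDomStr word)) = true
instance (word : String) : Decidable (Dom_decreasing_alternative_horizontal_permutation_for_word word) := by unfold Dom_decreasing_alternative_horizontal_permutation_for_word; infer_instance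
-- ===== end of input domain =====

-- B replaces A's arithmetic destination-index bookkeeping with a two-pointer front/back interleave
-- followed by one reverse (objective: idiomatic; same O(n) cost, identical return value proved below).

-- ===== PORT A =====
-- A builds a preallocated list of one-character strings (each modeled as a List Char) and joins it;
-- each iteration writes wordout_ls[-i-1] (pySetD, negative index) from word[i//2] or word[-(i//2)-1].
-- The pyGetD defaults are never used: all indices are in range (established in the lemmas below).
def decreasing_alternative_horizontal_permutation_for_word (word : String) : String :=
  let cs := word.toList
  let n := cs.length
  let wordout := List.replicate n ([] : List Char)
  if n % 2 == 0 then
    let out := (PySem.List.pyRange 0 (n : Int) 1).foldl (fun acc i =>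
      if PySem.Int.mod i 2 == 0 then
        PySem.List.pySetD acc (-i - 1) [PySem.List.pyGetD cs (PySem.Int.floordiv i 2) ' ']
      else
        PySem.List.pySetD acc (-i - 1) [PySem.List.pyGetD cs (-(PySem.Int.floordiv i 2) - 1) ' ']) wordout
    String.ofList (PySem.Chars.join [] out)
  else
    let out := (PySem.List.pyRange 0 (n : Int) 1).foldl (fun acc i =>
      if PySem.Int.mod i 2 == 1 then
        PySem.List.pySetD acc (-i - 1) [PySem.List.pyGetD cs (PySem.Int.floordiv i 2) ' ']
      else
        PySem.List.pySetD acc (-i - 1) [PySem.List.pyGetD cs (-(PySem.Int.floordiv i 2) - 1) ' ']) wordout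
    String.ofList (PySem.Chars.join [] out)

-- ===== PORT B =====
-- the while loop of Source B: two Int pointers l and r (as in Python), alternating flag, output accumulator
def pvAltGo (cs : List Char) (l r : Int) (takeLeft : Bool) (out : List Char) : List Char :=
  if _h : l ≤ r then
    if takeLeft then pvAltGo cs (l + 1) r false (out ++ [PySem.List.pyGetD cs l ' '])
    else pvAltGo cs l (r - 1) true (out ++ [PySem.List.pyGetD cs r ' '])
  else out
termination_by (r + 1 - l).toNat
decreasing_by all_goals omega

def decreasing_alternative_horizontal_permutation_for_word_alt (word : String) : String :=
  let cs := word.toList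
  String.ofList ((pvAltGo cs 0 ((cs.length : Int) - 1) (cs.length % 2 == 0) []).reverse)

-- ===== PRECONDITION & SPEC =====
def Spec_decreasing_alternative_horizontal_permutation_for_word (word : String) (out : String) : Prop := out = decreasing_alternative_horizontal_permutation_for_word_alt word
instance (word : String) (out : String) : Decidable (Spec_decreasing_alternative_horizontal_permutation_for_word word out) := by unfold Spec_decreasing_alternative_horizontal_permutation_for_word; infer_instance

-- ===== CLAIM (what is proved, stated in full; the proofs are below) =====
def Claim_equal_decreasing_alternative_horizontal_permutation_for_word : Prop := ∀ (word : String), Dom_decreasing_alternative_horizontal_permutation_for_word word → Spec_decreasing_alternative_horizontal_permutation_for_word word (decreasing_alternative_horizontal_permutation_for_word word)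

-- ===== LEMMAS AND PROOFS =====

-- the character both programs place at position i of the (pre-reverse) layout
def pvC (cs : List Char) (i : Nat) : Char :=
  if (i + cs.length) % 2 == 0 then cs.getD ((i + (cs.length + 1) % 2) / 2) ' '
  else cs.getD (cs.length - 1 - (i + cs.length % 2) / 2) ' '

-- Python's ls[-i-1] = v for 0 ≤ i < len(ls) is a set at position len-1-i
lemma pvSetNeg {α : Type} (acc : List α) (i : Nat) (h : i < acc.length) (v : α) :
    PySem.List.pySetD acc (-(i : Int) - 1) v = acc.set (acc.length - 1 - i) v := by
  have h1 : ¬ ((1:Int) ≤ -(i:Int)) := by omega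
  simp only [PySem.List.pySetD, PySem.List.pySet?, PySem.List.pyIdx?]
  simp [h1, h]
  congr 1
  omega

-- A's loop fills the preallocated list back to front: after k steps the filled suffix is the reverse of w on range k
lemma pvFoldSet (n : Nat) (w : Nat → List Char) :
    ∀ k, k ≤ n →
      (List.range k).foldl (fun acc (i : Nat) => PySem.List.pySetD acc (-(i : Int) - 1) (w i))
        (List.replicate n ([] : List Char))
      = List.replicate (n - k) [] ++ ((List.range k).map w).reverse := by
  intro k
  induction k with
  | zero => simp
  | succ k ih =>
    intro hk
    rw [List.range_succ, List.foldl_append, ih (by omega)]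
    simp only [List.foldl_cons, List.foldl_nil, List.map_append, List.map_cons,
      List.map_nil, List.reverse_append]
    have hlen : (List.replicate (n - k) ([] : List Char) ++ ((List.range k).map w).reverse).length = n := by
      simp; omega
    rw [pvSetNeg _ k (by omega) (w k)]
    rw [hlen]
    have hrep : List.replicate (n - k) ([] : List Char) = List.replicate (n - (k+1)) [] ++ [[]] := by
      rw [← List.replicate_succ']
      congr 1
      omega
    rw [hrep]
    have hidx : n - 1 - k = (List.replicate (n - (k+1)) ([] : List Char)).length := by
      simp; omega
    rw [List.append_assoc, hidx]
    simp

-- either parity branch of A, once its body writes [pvC cs i] at -i-1, yields the closed form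
lemma pvFoldA (cs : List Char) (body : List (List Char) → Int → List (List Char))
    (hbody : ∀ (acc : List (List Char)) (i : Nat), i < cs.length →
      body acc ((0 : Int) + (i : Int)) = PySem.List.pySetD acc (-(i : Int) - 1) [pvC cs i]) :
    String.ofList (PySem.Chars.join []
        ((PySem.List.pyRange 0 (cs.length : Int) 1).foldl body (List.replicate cs.length [])))
      = String.ofList (((List.range cs.length).map (pvC cs)).reverse) := by
  rw [PySem.List.pyRange_one]
  have hn : ((cs.length : Int) - 0).toNat = cs.length := by omega
  rw [hn, List.foldl_map]
  rw [PySem.List.foldl_congr_mem _ _ (fun acc (i : Nat) => PySem.List.pySetD acc (-(i : Int) - 1) [pvC cs i]) _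
    (fun acc i hi => hbody acc i (List.mem_range.mp hi))]
  rw [pvFoldSet cs.length _ cs.length le_rfl]
  simp only [Nat.sub_self, List.replicate_zero, List.nil_append]
  have : (List.range cs.length).map (fun i => [pvC cs i]) = ((List.range cs.length).map (pvC cs)).map (fun c => [c]) := by
    simp [List.map_map, Function.comp]
  rw [this, ← List.map_reverse, PySem.Chars.join_nil_singletons]

lemma pvDiv (i : Nat) : PySem.Int.floordiv ((0:Int) + i) 2 = ((i / 2 : Nat) : Int) := by
  rw [PySem.Int.floordiv_eq_ediv_of_pos (by norm_num)]
  omega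

lemma pvMod (i : Nat) : PySem.Int.mod ((0:Int) + i) 2 = ((i % 2 : Nat) : Int) := by
  rw [PySem.Int.mod_eq_emod_of_pos (by norm_num)]
  omega

-- the "front" read word[i//2] is pvC cs i whenever the (i+len) parity is even
lemma pvValT (cs : List Char) (i : Nat) (_hi : i < cs.length) (hpar : (i + cs.length) % 2 = 0) :
    [PySem.List.pyGetD cs (PySem.Int.floordiv ((0:Int) + i) 2) ' '] = [pvC cs i] := by
  rw [pvDiv, PySem.List.pyGetD_natCast]
  unfold pvC
  rw [if_pos (by simpa using hpar)]
  have : (i + (cs.length + 1) % 2) / 2 = i / 2 := by omega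
  rw [this]

-- the "back" read word[-(i//2)-1] is pvC cs i whenever the (i+len) parity is odd
lemma pvValF (cs : List Char) (i : Nat) (hi : i < cs.length) (hpar : (i + cs.length) % 2 = 1) :
    [PySem.List.pyGetD cs (-(PySem.Int.floordiv ((0:Int) + i) 2) - 1) ' '] = [pvC cs i] := by
  have hneg : -(PySem.Int.floordiv ((0:Int) + i) 2) - 1 = -((i / 2 + 1 : Nat) : Int) := by
    rw [pvDiv]; push_cast; ring
  rw [hneg, PySem.List.pyGetD_neg_natCast cs (i / 2 + 1) ' ' (by omega) (by omega)]
  unfold pvC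
  rw [if_neg (by simp [hpar])]
  have hidx : cs.length - 1 - (i + cs.length % 2) / 2 = cs.length - (i / 2 + 1) := by omega
  rw [hidx, List.getD_eq_getElem cs ' ' (show cs.length - (i / 2 + 1) < cs.length by omega)]

lemma pvAClosed (word : String) :
    decreasing_alternative_horizontal_permutation_for_word word
      = String.ofList (((List.range word.toList.length).map (pvC word.toList)).reverse) := by
  unfold decreasing_alternative_horizontal_permutation_for_word
  by_cases h2 : word.toList.length % 2 = 0
  · rw [if_pos (by simpa using h2)]
    apply pvFoldA
    intro acc i hi
    show (if PySem.Int.mod ((0:Int) + i) 2 == 0 then _ else _) = _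
    rw [pvMod]
    have haddr : -((0:Int) + i) - 1 = -(i : Int) - 1 := by ring
    by_cases hp : i % 2 = 0
    · rw [if_pos (by simp [hp]), haddr]
      congr 1
      exact pvValT word.toList i hi (by omega)
    · rw [if_neg (by simp [Nat.mod_two_ne_zero.mp hp]), haddr]
      congr 1
      exact pvValF word.toList i hi (by omega)
  · rw [if_neg (by simpa using h2)]
    apply pvFoldA
    intro acc i hi
    show (if PySem.Int.mod ((0:Int) + i) 2 == 1 then _ else _) = _
    rw [pvMod]
    have haddr : -((0:Int) + i) - 1 = -(i : Int) - 1 := by ring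
    by_cases hp : i % 2 = 1
    · rw [if_pos (by simp [hp]), haddr]
      congr 1
      exact pvValT word.toList i hi (by omega)
    · rw [if_neg (by simp [Nat.mod_two_ne_one.mp hp]), haddr]
      congr 1
      exact pvValF word.toList i hi (by omega)

-- B's loop invariant: with i characters consumed, the pointers and flag are determined by i and
-- the word's parity, and the loop emits exactly pvC cs i, pvC cs (i+1), …
lemma pvGoSpec (cs : List Char) :
    ∀ (m i : Nat) (out : List Char), i + m = cs.length →
      pvAltGo cs (((i + (cs.length + 1) % 2) / 2 : Nat) : Int)
        ((cs.length : Int) - 1 - (((i + cs.length % 2) / 2 : Nat) : Int))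
        ((i + cs.length) % 2 == 0) out
      = out ++ (List.range' i m).map (pvC cs) := by
  intro m
  induction m with
  | zero =>
    intro i out hi
    rw [pvAltGo]
    rw [dif_neg (by omega)]
    simp
  | succ m ih =>
    intro i out hi
    rw [pvAltGo]
    rw [dif_pos (by omega)]
    by_cases hp : (i + cs.length) % 2 = 0
    · rw [if_pos (by simpa using hp)]
      have hl : (((i + (cs.length + 1) % 2) / 2 : Nat) : Int) + 1 = (((i + 1 + (cs.length + 1) % 2) / 2 : Nat) : Int) := by
        omega
      have hr : ((cs.length : Int) - 1 - (((i + cs.length % 2) / 2 : Nat) : Int)) = ((cs.length : Int) - 1 - (((i + 1 + cs.length % 2) / 2 : Nat) : Int)) := by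
        omega
      have hflag : false = ((i + 1 + cs.length) % 2 == 0) := by
        simp; omega
      rw [hl, hr, hflag, ih (i + 1) _ (by omega)]
      rw [List.range'_succ, List.map_cons]
      have hval : PySem.List.pyGetD cs (((i + (cs.length + 1) % 2) / 2 : Nat) : Int) ' ' = pvC cs i := by
        rw [PySem.List.pyGetD_natCast]
        unfold pvC
        rw [if_pos (by simpa using hp)]
      rw [hval]
      simp
    · rw [if_neg (by simpa using hp)]
      have hl : (((i + (cs.length + 1) % 2) / 2 : Nat) : Int) = (((i + 1 + (cs.length + 1) % 2) / 2 : Nat) : Int) := by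
        omega
      have hr : ((cs.length : Int) - 1 - (((i + cs.length % 2) / 2 : Nat) : Int)) - 1 = ((cs.length : Int) - 1 - (((i + 1 + cs.length % 2) / 2 : Nat) : Int)) := by
        omega
      have hflag : true = ((i + 1 + cs.length) % 2 == 0) := by
        simp; omega
      rw [hl, hr, hflag, ih (i + 1) _ (by omega)]
      rw [List.range'_succ, List.map_cons]
      have hval : PySem.List.pyGetD cs ((cs.length : Int) - 1 - (((i + cs.length % 2) / 2 : Nat) : Int)) ' ' = pvC cs i := by
        have : ((cs.length : Int) - 1 - (((i + cs.length % 2) / 2 : Nat) : Int)) = ((cs.length - 1 - (i + cs.length % 2) / 2 : Nat) : Int) := by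
          omega
        rw [this, PySem.List.pyGetD_natCast]
        unfold pvC
        rw [if_neg (by simpa using hp)]
      rw [hval]
      simp

lemma pvBClosed (word : String) :
    decreasing_alternative_horizontal_permutation_for_word_alt word
      = String.ofList (((List.range word.toList.length).map (pvC word.toList)).reverse) := by
  show String.ofList ((pvAltGo word.toList 0 ((word.toList.length : Int) - 1) (word.toList.length % 2 == 0) []).reverse) = _
  have h0 : (0 : Int) = (((0 + (word.toList.length + 1) % 2) / 2 : Nat) : Int) := by omega
  have hr : ((word.toList.length : Int) - 1) = ((word.toList.length : Int) - 1 - (((0 + word.toList.length % 2) / 2 : Nat) : Int)) := by omega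
  have hf : (word.toList.length % 2 == 0) = ((0 + word.toList.length) % 2 == 0) := by simp
  rw [h0, hr, hf, pvGoSpec word.toList word.toList.length 0 [] (by omega)]
  rw [List.nil_append, List.range_eq_range']

-- ===== VERDICT (by name: the statement is the Claim_ definition above) =====
theorem decreasing_alternative_horizontal_permutation_for_word_spec : Claim_equal_decreasing_alternative_horizontal_permutation_for_word := by
  intro word _
  unfold Spec_decreasing_alternative_horizontal_permutation_for_word
  rw [pvAClosed, pvBClosed]
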